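-- pv_equiv track=rewrite | github.com/hvariant/rosalind_sol | pcov.py | search
-- ===== SOURCE A (Python) =====
-- def adj(s1,s2):
--     return s1[1:] == s2[:-1]
--
-- def search(dnas):
--     ans = []
--     success = False
--
--     stack = []
--     stack.append(([],set([])))
--
--     while len(stack) > 0 and not success:
--         path,vs = stack.pop()
--
--         if len(path) == len(dnas): # circle
--             success = True
--             ans = list(path)
--             break
--
--         for dna in dnas:
--             if not dna in vs and (len(path) == 0 or adj(path[-1],dna) ):
--                 stack.append((path + [dna],vs.union(set(dna))))
--
--     if success:
--         return ans
-- ===== SOURCE B (Python) =====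
-- def adj(s1, s2):
--     return s1[1:] == s2[:-1]
--
-- def search(dnas):
--     def dfs(path, vs):
--         if len(path) == len(dnas):
--             return list(path)
--         for dna in reversed(dnas):
--             if dna not in vs and (not path or adj(path[-1], dna)):
--                 r = dfs(path + [dna], vs | set(dna))
--                 if r is not None:
--                     return r
--         return None
--     return dfs([], set())
-- ===== Notes on version B (the rewrite author's own statement) =====
-- stated objective: simpler
-- what changed: A's explicit-stack while-loop DFS (pushing candidate frames and popping LIFO) is replaced by a short recursive backtracking helper dfs(path, vs) that iterates over reversed(dnas) and returns the first non-None recursive result.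
import Mathlib
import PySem

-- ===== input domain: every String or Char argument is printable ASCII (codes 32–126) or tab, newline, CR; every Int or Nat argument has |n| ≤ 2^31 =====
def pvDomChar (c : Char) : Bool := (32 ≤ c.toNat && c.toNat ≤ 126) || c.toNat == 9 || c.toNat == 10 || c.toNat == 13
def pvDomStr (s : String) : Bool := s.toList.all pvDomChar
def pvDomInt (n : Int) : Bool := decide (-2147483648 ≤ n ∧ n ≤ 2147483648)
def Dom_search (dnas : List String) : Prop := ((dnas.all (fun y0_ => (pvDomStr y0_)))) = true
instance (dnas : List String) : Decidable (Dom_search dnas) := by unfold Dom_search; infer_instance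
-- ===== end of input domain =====

-- B rewrites A's explicit-stack DFS as recursive backtracking over reversed(dnas); same value, different decomposition (objective: simpler).

-- ===== PORT A =====
-- adj(s1, s2) = (s1[1:] == s2[:-1]); s[1:] = drop 1 and s[:-1] = dropLast are exact for every string (empty included)
def adjP (s1 s2 : String) : Bool :=
  s1.toList.drop 1 == s2.toList.dropLast

-- Python 'dna in vs' where vs is a set of CHARACTERS: true iff dna is a one-character string whose character is in vs
def memVS (dna : String) (vs : PySem.Set Char) : Bool :=
  match dna.toList with
  | [c] => vs.contains c
  | _ => false

-- the loop-body condition 'not dna in vs and (len(path) == 0 or adj(path[-1],dna))'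
-- (path[-1] guarded by len(path) == 0, so getLast? none ↔ the guard fires; exact)
def okP (path : List String) (vs : PySem.Set Char) (dna : String) : Bool :=
  !(memVS dna vs) && (path.length == 0 || (match path.getLast? with
                                           | some last => adjP last dna
                                           | none => true))

-- 'for dna in dnas: if …: stack.append((path + [dna], vs.union(set(dna))))'
def pushA (dnas path : List String) (vs : PySem.Set Char) :
    List (List String × PySem.Set Char) :=
  dnas.foldl (fun acc dna =>
    if okP path vs dna then acc ++ [(path ++ [dna], PySem.Set.union vs dna.toList)]
    else acc) []

-- the while-loop; the stack is kept TOP-AT-HEAD (so Python's append-then-pop-from-the-end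
-- becomes prepending the new frames in reversed order); fuel only makes the recursion total,
-- (n+1)^(n+1) iterations are proved sufficient below
def loopA (dnas : List String) : Nat → List (List String × PySem.Set Char) → Option (List String)
  | 0, _ => none
  | _ + 1, [] => none
  | fuel + 1, (path, vs) :: rest =>
    if path.length = dnas.length then some path
    else loopA dnas fuel ((pushA dnas path vs).reverse ++ rest)

def search (dnas : List String) : Option (List String) :=
  loopA dnas ((dnas.length + 1) ^ (dnas.length + 1)) [([], PySem.Set.empty)]

-- ===== PORT B =====
-- the 'for dna in …' loop of dfs: try each candidate, return the first non-None recursive result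
def goB (rec : List String → PySem.Set Char → Option (List String))
    (path : List String) (vs : PySem.Set Char) : List String → Option (List String)
  | [] => none
  | dna :: rest =>
    if okP path vs dna then
      match rec (path ++ [dna]) (PySem.Set.union vs dna.toList) with
      | some r => some r
      | none => goB rec path vs rest
    else goB rec path vs rest

-- dfs(path, vs); fuel only makes the recursion total, depth dnas.length + 1 is proved sufficient below
def dfsB (dnas : List String) : Nat → List String → PySem.Set Char → Option (List String)
  | 0, _, _ => none
  | fuel + 1, path, vs =>
    if path.length = dnas.length then some path
    else goB (dfsB dnas fuel) path vs dnas.reverse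

def search_alt (dnas : List String) : Option (List String) :=
  dfsB dnas (dnas.length + 1) [] PySem.Set.empty

-- ===== PRECONDITION & SPEC =====
def Spec_search (dnas : List String) (out : Option (List String)) : Prop := out = search_alt dnas
instance (dnas : List String) (out : Option (List String)) : Decidable (Spec_search dnas out) := by unfold Spec_search; infer_instance

-- ===== CLAIM (what is proved, stated in full; the proofs are below) =====
def Claim_equal_search : Prop := ∀ (dnas : List String), Dom_search dnas → Spec_search dnas (search dnas)

-- ===== LEMMAS AND PROOFS =====

-- first-success over a stack of frames, each explored with its canonical fuel
def fsL (dnas : List String) : List (List String × PySem.Set Char) → Option (List String)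
  | [] => none
  | (p, v) :: rest =>
    match dfsB dnas (dnas.length + 1 - p.length) p v with
    | some r => some r
    | none => fsL dnas rest

def measL (dnas : List String) (stack : List (List String × PySem.Set Char)) : Nat :=
  (stack.map (fun pv => (dnas.length + 1) ^ (dnas.length + 1 - pv.1.length))).sum

theorem fsL_append (dnas : List String) (a b : List (List String × PySem.Set Char)) :
    fsL dnas (a ++ b) = match fsL dnas a with
                        | some r => some r
                        | none => fsL dnas b := by
  induction a with
  | nil => simp [fsL]
  | cons pv rest ih =>
    obtain ⟨p, v⟩ := pv
    simp only [List.cons_append, fsL, ih]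
    cases dfsB dnas (dnas.length + 1 - p.length) p v <;> simp

theorem pushA_eq (dnas path : List String) (vs : PySem.Set Char) :
    pushA dnas path vs
      = (dnas.filter (okP path vs)).map
          (fun dna => (path ++ [dna], PySem.Set.union vs dna.toList)) := by
  unfold pushA
  have key : ∀ (l : List String) (acc : List (List String × PySem.Set Char)),
      l.foldl (fun acc dna =>
        if okP path vs dna then acc ++ [(path ++ [dna], PySem.Set.union vs dna.toList)]
        else acc) acc
      = acc ++ (l.filter (okP path vs)).map
          (fun dna => (path ++ [dna], PySem.Set.union vs dna.toList)) := by
    intro l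
    induction l with
    | nil => simp
    | cons dna rest ih =>
      intro acc
      simp only [List.foldl_cons, List.filter_cons]
      by_cases hc : okP path vs dna = true
      · simp [hc, ih]
      · simp [hc, ih]
  simpa using key dnas []

theorem goB_eq_fsL (dnas path : List String) (vs : PySem.Set Char) (l : List String) :
    goB (dfsB dnas (dnas.length - path.length)) path vs l
      = fsL dnas ((l.filter (okP path vs)).map
          (fun dna => (path ++ [dna], PySem.Set.union vs dna.toList))) := by
  induction l with
  | nil => rfl
  | cons dna rest ih =>
    simp only [goB, List.filter_cons]
    by_cases hc : okP path vs dna = true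
    · simp only [hc, if_true, List.map_cons, fsL]
      have : dnas.length + 1 - (path ++ [dna]).length = dnas.length - path.length := by
        simp
      rw [this]
      cases dfsB dnas (dnas.length - path.length) (path ++ [dna]) (PySem.Set.union vs dna.toList) with
      | none => simpa using ih
      | some r => simp
    · simp only [hc, if_false, Bool.false_eq_true]
      simpa using ih

theorem measL_cons (dnas : List String) (p : List String) (v : PySem.Set Char)
    (rest : List (List String × PySem.Set Char)) :
    measL dnas ((p, v) :: rest)
      = (dnas.length + 1) ^ (dnas.length + 1 - p.length) + measL dnas rest := by
  simp [measL]

theorem measL_append (dnas : List String) (a b : List (List String × PySem.Set Char)) :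
    measL dnas (a ++ b) = measL dnas a + measL dnas b := by
  simp [measL]

theorem loopA_eq_fsL (dnas : List String) (fuel : Nat) :
    ∀ stack, (∀ pv ∈ stack, pv.1.length ≤ dnas.length) →
    measL dnas stack ≤ fuel → loopA dnas fuel stack = fsL dnas stack := by
  induction fuel with
  | zero =>
    intro stack hinv hm
    cases stack with
    | nil => rfl
    | cons pv rest =>
      exfalso
      obtain ⟨p, v⟩ := pv
      rw [measL_cons] at hm
      have : 1 ≤ (dnas.length + 1) ^ (dnas.length + 1 - p.length) :=
        Nat.one_le_pow _ _ (by omega)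
      omega
  | succ f ih =>
    intro stack hinv hm
    cases stack with
    | nil => rfl
    | cons pv rest =>
      obtain ⟨p, v⟩ := pv
      have hp : p.length ≤ dnas.length := hinv (p, v) (by simp)
      by_cases hl : p.length = dnas.length
      · simp only [loopA, if_pos hl, fsL]
        have : dnas.length + 1 - p.length = 1 := by omega
        rw [this]
        simp [dfsB, hl]
      · simp only [loopA, if_neg hl, fsL]
        have hplt : p.length < dnas.length := by omega
        -- measure bookkeeping
        have hcnt : (pushA dnas p v).length ≤ dnas.length := by
          rw [pushA_eq]; simpa using List.length_filter_le _ _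
        have hwt : ∀ pv' ∈ pushA dnas p v,
            pv'.1.length = p.length + 1 := by
          intro pv' h
          rw [pushA_eq] at h
          obtain ⟨dna, -, rfl⟩ := List.mem_map.mp h
          simp
        have hmeasc : measL dnas (pushA dnas p v)
            ≤ dnas.length * (dnas.length + 1) ^ (dnas.length - p.length) := by
          unfold measL
          calc ((pushA dnas p v).map
                  (fun pv => (dnas.length + 1) ^ (dnas.length + 1 - pv.1.length))).sum
              ≤ ((pushA dnas p v).map
                  (fun _ => (dnas.length + 1) ^ (dnas.length - p.length))).sum := by
                apply List.sum_le_sum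
                intro pv h
                rw [hwt pv h]
                exact Nat.pow_le_pow_right (by omega) (by omega)
            _ = (pushA dnas p v).length * (dnas.length + 1) ^ (dnas.length - p.length) := by
                rw [List.map_const', List.sum_replicate, smul_eq_mul]
            _ ≤ dnas.length * (dnas.length + 1) ^ (dnas.length - p.length) :=
                Nat.mul_le_mul_right _ hcnt
        have hmeasrev : measL dnas ((pushA dnas p v).reverse) = measL dnas (pushA dnas p v) := by
          unfold measL; rw [List.map_reverse, List.sum_reverse]
        have hexp : (dnas.length + 1) ^ (dnas.length + 1 - p.length)
            = (dnas.length + 1) * (dnas.length + 1) ^ (dnas.length - p.length) := by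
          have : dnas.length + 1 - p.length = (dnas.length - p.length) + 1 := by omega
          rw [this, pow_succ, Nat.mul_comm]
        have hm' : measL dnas ((pushA dnas p v).reverse ++ rest) ≤ f := by
          rw [measL_append, hmeasrev]
          rw [measL_cons, hexp] at hm
          have h1 : 1 ≤ (dnas.length + 1) ^ (dnas.length - p.length) :=
            Nat.one_le_pow _ _ (by omega)
          have hsm : (dnas.length + 1) * (dnas.length + 1) ^ (dnas.length - p.length)
              = dnas.length * (dnas.length + 1) ^ (dnas.length - p.length)
                + (dnas.length + 1) ^ (dnas.length - p.length) := by ring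
          omega
        have hinv' : ∀ pv' ∈ (pushA dnas p v).reverse ++ rest, pv'.1.length ≤ dnas.length := by
          intro pv' h
          rcases List.mem_append.mp h with h | h
          · rw [hwt pv' (List.mem_reverse.mp h)]; omega
          · exact hinv pv' (by simp [h])
        rw [ih _ hinv' hm', fsL_append]
        -- identify fsL of the reversed children with goB over dnas.reverse
        have hfuel : dnas.length + 1 - p.length = (dnas.length - p.length) + 1 := by omega
        rw [hfuel]
        simp only [dfsB, if_neg hl]
        rw [goB_eq_fsL dnas p v dnas.reverse]
        congr 1
        rw [pushA_eq]
        simp [← List.map_reverse, List.filter_reverse]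

-- ===== VERDICT (by name: the statement is the Claim_ definition above) =====
theorem search_spec : Claim_equal_search := by
  intro dnas _
  unfold Spec_search search search_alt
  rw [loopA_eq_fsL dnas _ [([], PySem.Set.empty)] (by simp) (by simp [measL])]
  simp only [fsL]
  have : dnas.length + 1 - ([] : List String).length = dnas.length + 1 := by simp
  rw [this]
  cases dfsB dnas (dnas.length + 1) [] PySem.Set.empty <;> rfl
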